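-- pv_equiv track=rewrite | github.com/nikitarub/multidata | backend/data_postprocessor.py | get_bend_not_bend_index_lables
-- ===== SOURCE A (Python) =====
-- def get_bend_not_bend_index_lables(lables_data, bias=0): # works with not ground lables
--     current = lables_data[0]
--     start = 0
--     left_bias = 0
--     right_bias = bias
--     bend_index = []
--     not_bend_index = []
--     for i,each in enumerate(lables_data[1:]):
--         if each != current:
--             if (len(lables_data[1:]) - i) < bias:
--                 right_bias = 0
--             if each > current:
--                 not_bend_index.append((start - left_bias, i + right_bias))
--             else:
--                 bend_index.append((start - left_bias, i + right_bias))
--             start = i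
--             left_bias = bias
--         current = each
--     return bend_index, not_bend_index
-- ===== SOURCE B (Python) =====
-- def get_bend_not_bend_index_lables(lables_data, bias=0):
--     # Run-length view: compress the labels into maximal runs first, then each adjacent
--     # pair of runs yields one interval at the run boundary (cumulative run length - 1),
--     # with closed-form left/right biases instead of A's threaded loop state.
--     runs = []  # [label, run_length], in order
--     for x in lables_data:
--         if runs and runs[-1][0] == x:
--             runs[-1][1] += 1
--         else:
--             runs.append([x, 1])
--     last = len(lables_data) - 1
--     bend, not_bend = [], []
--     end = 0   # elements covered by runs[0..j]
--     prev = 0  # boundary index of the previous run pair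
--     for j, (a, b) in enumerate(zip(runs, runs[1:])):
--         end += a[1]
--         i = end - 1
--         lo = prev - (0 if j == 0 else bias)
--         hi = i + (bias if last - i >= bias else 0)
--         if b[0] > a[0]:
--             not_bend.append((lo, hi))
--         else:
--             bend.append((lo, hi))
--         prev = i
--     return bend, not_bend
-- ===== Notes on version B (the rewrite author's own statement) =====
-- stated objective: faster
-- what changed: A's single stateful element pass (threading current/start/left_bias and a sticky right_bias, re-slicing lables_data[1:] for its length at every change) is replaced by building a run-length encoding of the labels first and then emitting one interval per adjacent run pair at the cumulative-run-length boundary, with closed-form left/right biases.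
import Mathlib
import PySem

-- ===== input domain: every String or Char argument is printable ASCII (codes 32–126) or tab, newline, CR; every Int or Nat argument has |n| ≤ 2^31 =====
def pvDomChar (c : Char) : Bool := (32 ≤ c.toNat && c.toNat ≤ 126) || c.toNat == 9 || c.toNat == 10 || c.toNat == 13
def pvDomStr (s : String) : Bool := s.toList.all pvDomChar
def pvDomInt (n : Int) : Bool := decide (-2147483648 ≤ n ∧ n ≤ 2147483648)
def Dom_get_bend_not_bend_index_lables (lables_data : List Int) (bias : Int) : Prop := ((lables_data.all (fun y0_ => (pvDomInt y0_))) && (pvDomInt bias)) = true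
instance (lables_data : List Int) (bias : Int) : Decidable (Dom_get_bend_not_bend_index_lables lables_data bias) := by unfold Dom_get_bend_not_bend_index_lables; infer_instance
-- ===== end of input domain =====

-- B compresses the labels into a run-length encoding first and derives one interval per
-- adjacent run pair with closed-form biases, instead of A's stateful element-by-element pass
-- (objective: faster; A re-slices lables_data[1:] at every change).

-- ===== PORT A =====
-- loop body of A's for-loop; state = (current, start, left_bias, right_bias, bend_index, not_bend_index)
def pvStepA (bias n1 : Int)
    (s : Int × Int × Int × Int × List (Int × Int) × List (Int × Int)) (p : Int × Int) :
    Int × Int × Int × Int × List (Int × Int) × List (Int × Int) :=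
  let (current, start, left_bias, right_bias, bend, nbend) := s
  let i := p.1
  let each := p.2
  if each ≠ current then
    let right_bias := if n1 - i < bias then 0 else right_bias
    if each > current then
      (each, i, bias, right_bias, bend, nbend ++ [(start - left_bias, i + right_bias)])
    else
      (each, i, bias, right_bias, bend ++ [(start - left_bias, i + right_bias)], nbend)
  else
    (each, start, left_bias, right_bias, bend, nbend)

def get_bend_not_bend_index_lables (lables_data : List Int) (bias : Int) :
    (List (Int × Int)) × (List (Int × Int)) :=
  match lables_data with
  | [] => ([], [])  -- Python: IndexError on lables_data[0]; excluded by Pre_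
  | current :: _ =>
    let tl := PySem.List.slice lables_data (some 1) none   -- lables_data[1:]
    let n1 : Int := tl.length                              -- len(lables_data[1:])
    let st := (PySem.List.enumerate tl 0).foldl (pvStepA bias n1)
      (current, 0, 0, bias, ([] : List (Int × Int)), ([] : List (Int × Int)))
    (st.2.2.2.2.1, st.2.2.2.2.2)

-- ===== PORT B =====
-- B's run-length-encoding loop body: extend the last run or start a new one
def pvRle (runs : List (Int × Int)) (x : Int) : List (Int × Int) :=
  match runs.getLast? with
  | some (l, c) => if l = x then runs.dropLast ++ [(l, c + 1)] else runs ++ [(x, 1)]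
  | none => runs ++ [(x, 1)]

-- B's classification-loop body; state = (end, prev, bend, not_bend); p = (j, (a, b))
def pvStepR (bias last : Int)
    (s : Int × Int × List (Int × Int) × List (Int × Int))
    (p : Int × ((Int × Int) × (Int × Int))) :
    Int × Int × List (Int × Int) × List (Int × Int) :=
  let (e, prev, bend, nbend) := s
  let e' := e + p.2.1.2
  let i := e' - 1
  let lo := prev - (if p.1 = 0 then 0 else bias)
  let hi := i + (if bias ≤ last - i then bias else 0)
  if p.2.2.1 > p.2.1.1 then (e', i, bend, nbend ++ [(lo, hi)])
  else (e', i, bend ++ [(lo, hi)], nbend)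

def get_bend_not_bend_index_lables_alt (lables_data : List Int) (bias : Int) :
    (List (Int × Int)) × (List (Int × Int)) :=
  let runs := lables_data.foldl pvRle []
  let last : Int := (lables_data.length : Int) - 1
  let st := (PySem.List.enumerate (runs.zip (PySem.List.slice runs (some 1) none)) 0).foldl
      (pvStepR bias last) ((0 : Int), (0 : Int), ([] : List (Int × Int)), ([] : List (Int × Int)))
  (st.2.2.1, st.2.2.2)

-- ===== PRECONDITION & SPEC =====
-- Pre_ excludes only the empty list, on which A raises IndexError.
def Pre_get_bend_not_bend_index_lables (lables_data : List Int) (bias : Int) : Prop :=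
  lables_data ≠ []
instance (lables_data : List Int) (bias : Int) : Decidable (Pre_get_bend_not_bend_index_lables lables_data bias) := by unfold Pre_get_bend_not_bend_index_lables; infer_instance
def pvWitness_get_bend_not_bend_index_lables : List Int × Int := ([0, 1, 1, 0], 1)

def Spec_get_bend_not_bend_index_lables (lables_data : List Int) (bias : Int) (out : (List (Int × Int)) × (List (Int × Int))) : Prop := out = get_bend_not_bend_index_lables_alt lables_data bias
instance (lables_data : List Int) (bias : Int) (out : (List (Int × Int)) × (List (Int × Int))) : Decidable (Spec_get_bend_not_bend_index_lables lables_data bias out) := by unfold Spec_get_bend_not_bend_index_lables; infer_instance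

-- ===== CLAIM (what is proved, stated in full; the proofs are below) =====
def Claim_equal_get_bend_not_bend_index_lables : Prop := ∀ (lables_data : List Int) (bias : Int), Dom_get_bend_not_bend_index_lables lables_data bias → Pre_get_bend_not_bend_index_lables lables_data bias → Spec_get_bend_not_bend_index_lables lables_data bias (get_bend_not_bend_index_lables lables_data bias)
-- ===== LEMMAS AND PROOFS =====

-- Proof-only recursive run-length encoding (head recursion, easy to induct on).
def pvRleRec : List Int → List (Int × Int)
  | [] => []
  | x :: xs =>
    match pvRleRec xs with
    | (l, c) :: rs => if x = l then (x, c + 1) :: rs else (x, 1) :: (l, c) :: rs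
    | [] => [(x, 1)]

-- Concatenation of two run lists, merging the boundary runs when their labels agree.
def pvGlue (R S : List (Int × Int)) : List (Int × Int) :=
  match R.getLast?, S with
  | some (l, c), (l', c') :: rest => if l = l' then R.dropLast ++ (l, c + c') :: rest else R ++ S
  | _, _ => R ++ S

lemma pvRleRec_head (x : Int) (xs : List Int) :
    ∃ c t, pvRleRec (x :: xs) = (x, c) :: t := by
  show ∃ c t, (match pvRleRec xs with
    | (l, c) :: rs => if x = l then (x, c + 1) :: rs else (x, 1) :: (l, c) :: rs
    | [] => [(x, 1)]) = (x, c) :: t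
  cases h : pvRleRec xs with
  | nil => exact ⟨1, [], rfl⟩
  | cons p rs =>
    obtain ⟨l, c⟩ := p
    by_cases hxl : x = l
    · exact ⟨c + 1, rs, by simp [hxl]⟩
    · exact ⟨1, (l, c) :: rs, by simp [hxl]⟩

lemma pvGlue_nil_left (S : List (Int × Int)) : pvGlue [] S = S := by
  cases S <;> simp [pvGlue]

lemma pv_rle_glue : ∀ (xs : List Int) (R : List (Int × Int)),
    xs.foldl pvRle R = pvGlue R (pvRleRec xs) := by
  intro xs
  induction xs with
  | nil =>
    intro R
    show R = pvGlue R []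
    rcases h : R.getLast? with _ | p <;> simp [pvGlue, h]
  | cons x xs ih =>
    intro R
    rw [List.foldl_cons, ih]
    rcases R.eq_nil_or_concat with rfl | ⟨R', ⟨l0, c0⟩, rfl⟩
    · -- R = []
      rw [show pvRle [] x = [(x, 1)] from rfl, pvGlue_nil_left]
      show pvGlue [(x, 1)] (pvRleRec xs) =
        (match pvRleRec xs with
          | (l, c) :: rs => if x = l then (x, c + 1) :: rs else (x, 1) :: (l, c) :: rs
          | [] => [(x, 1)])
      cases h : pvRleRec xs with
      | nil => simp [pvGlue]
      | cons p rs =>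
        obtain ⟨l, c⟩ := p
        by_cases hxl : x = l
        · subst hxl; simp [pvGlue]; omega
        · simp [pvGlue, hxl, Ne.symm hxl]
    · -- R = R' ++ [(l0, c0)]
      have hlast : (R'.concat (l0, c0)).getLast? = some (l0, c0) := by
        simp [List.concat_eq_append]
      have hdrop : (R'.concat (l0, c0)).dropLast = R' := by
        simp [List.concat_eq_append]
      by_cases hl0 : l0 = x
      · -- extend the last run of R
        subst hl0
        have hstep : pvRle (R'.concat (l0, c0)) l0 = R' ++ [(l0, c0 + 1)] := by
          simp [pvRle, hlast, hdrop]
        rw [hstep]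
        show pvGlue (R' ++ [(l0, c0 + 1)]) (pvRleRec xs) =
          pvGlue (R'.concat (l0, c0))
            (match pvRleRec xs with
              | (l, c) :: rs => if l0 = l then (l0, c + 1) :: rs else (l0, 1) :: (l, c) :: rs
              | [] => [(l0, 1)])
        cases h : pvRleRec xs with
        | nil =>
          simp [pvGlue, hlast, hdrop, List.concat_eq_append,
            List.getLast?_concat, List.dropLast_concat]
        | cons p rs =>
          obtain ⟨l, c⟩ := p
          by_cases hxl : l0 = l
          · subst hxl
            simp [pvGlue, hlast, hdrop, List.concat_eq_append,
              List.getLast?_concat, List.dropLast_concat]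
            omega
          · simp [pvGlue, hlast, hdrop, hxl, List.concat_eq_append,
              List.getLast?_concat, List.dropLast_concat]
      · -- start a new run after R
        have hstep : pvRle (R'.concat (l0, c0)) x = (R'.concat (l0, c0)) ++ [(x, 1)] := by
          simp [pvRle, hlast, hl0]
        rw [hstep]
        show pvGlue ((R'.concat (l0, c0)) ++ [(x, 1)]) (pvRleRec xs) =
          pvGlue (R'.concat (l0, c0))
            (match pvRleRec xs with
              | (l, c) :: rs => if x = l then (x, c + 1) :: rs else (x, 1) :: (l, c) :: rs
              | [] => [(x, 1)])
        cases h : pvRleRec xs with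
        | nil =>
          simp [pvGlue, hlast, hl0, List.concat_eq_append,
            List.getLast?_concat, List.dropLast_concat]
        | cons p rs =>
          obtain ⟨l, c⟩ := p
          by_cases hxl : x = l
          · subst hxl
            simp [pvGlue, hlast, hl0, List.concat_eq_append,
              List.getLast?_concat, List.dropLast_concat]
            omega
          · simp [pvGlue, hlast, hl0, hxl, List.concat_eq_append,
              List.getLast?_concat, List.dropLast_concat]

-- Incrementing the first run's count by one is the same as starting with `end` one higher:
-- only the outputs (.2.2) coincide (on the empty pair list the `end` components differ).
lemma pv_shift (bias last l c : Int) (t : List (Int × Int)) (j e prev : Int)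
    (bend nbend : List (Int × Int)) :
    ((PySem.List.enumerate (((l, c + 1) :: t).zip
        (PySem.List.slice ((l, c + 1) :: t) (some 1) none)) j).foldl
      (pvStepR bias last) (e, prev, bend, nbend)).2.2
    = ((PySem.List.enumerate (((l, c) :: t).zip
        (PySem.List.slice ((l, c) :: t) (some 1) none)) j).foldl
      (pvStepR bias last) (e + 1, prev, bend, nbend)).2.2 := by
  rw [PySem.List.slice_from_one, PySem.List.slice_from_one, List.tail_cons, List.tail_cons]
  cases t with
  | nil => simp [PySem.List.enumerate_nil]
  | cons q t' =>
    rw [List.zip_cons_cons, List.zip_cons_cons,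
      PySem.List.enumerate_cons, PySem.List.enumerate_cons,
      List.foldl_cons, List.foldl_cons]
    have : pvStepR bias last (e, prev, bend, nbend) (j, ((l, c + 1), q))
        = pvStepR bias last (e + 1, prev, bend, nbend) (j, ((l, c), q)) := by
      simp only [pvStepR]
      have h1 : e + (c + 1) = e + 1 + c := by ring
      rw [h1]
    rw [this]

-- Evaluation of one classification step on an explicit pair.
lemma pvStepR_eval (bias last e prev j la ca lb cb : Int)
    (bend nbend : List (Int × Int)) :
    pvStepR bias last (e, prev, bend, nbend) (j, ((la, ca), (lb, cb)))
    = if la < lb then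
        (e + ca, e + ca - 1, bend,
         nbend ++ [(prev - (if j = 0 then 0 else bias),
                    e + ca - 1 + (if bias ≤ last - (e + ca - 1) then bias else 0))])
      else
        (e + ca, e + ca - 1,
         bend ++ [(prev - (if j = 0 then 0 else bias),
                   e + ca - 1 + (if bias ≤ last - (e + ca - 1) then bias else 0))], nbend) := by
  by_cases h : la < lb <;> simp [pvStepR, h]

-- Main correspondence: A's stateful pass over the remaining labels equals B's classify pass
-- over the run pairs of `cur :: rest`, under the loop invariants (sticky right bias, the
-- cumulative-length counter equals A's index, the first-pair flag matches left_bias).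
lemma pv_main (bias m : Int) :
    ∀ (rest : List Int) (cur i start left right e j : Int) (bend nbend : List (Int × Int)),
      (right = bias ∨ (right = 0 ∧ m - i < bias)) →
      e = i →
      ((j = 0 ∧ left = 0) ∨ (j ≠ 0 ∧ left = bias)) →
      0 ≤ j →
      (((PySem.List.enumerate rest i).foldl (pvStepA bias m)
          (cur, start, left, right, bend, nbend)).2.2.2.2.1,
       ((PySem.List.enumerate rest i).foldl (pvStepA bias m)
          (cur, start, left, right, bend, nbend)).2.2.2.2.2) =
      ((PySem.List.enumerate ((pvRleRec (cur :: rest)).zip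
          (PySem.List.slice (pvRleRec (cur :: rest)) (some 1) none)) j).foldl
        (pvStepR bias m) (e, start, bend, nbend)).2.2 := by
  intro rest
  induction rest with
  | nil =>
    intro cur i start left right e j bend nbend hr he hj hj0
    have : pvRleRec [cur] = [(cur, 1)] := rfl
    rw [this, PySem.List.slice_from_one, List.tail_cons]
    simp [PySem.List.enumerate_nil]
  | cons x rs ih =>
    intro cur i start left right e j bend nbend hr he hj hj0
    rw [he]
    rw [PySem.List.enumerate_cons, List.foldl_cons]
    obtain ⟨c, t, hct⟩ := pvRleRec_head x rs
    by_cases hx : x = cur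
    · -- no change: A's state is unchanged (current := x = cur)
      subst hx
      have hA : pvStepA bias m (x, start, left, right, bend, nbend) (i, x)
          = (x, start, left, right, bend, nbend) := by simp [pvStepA]
      rw [hA]
      have hR : pvRleRec (x :: x :: rs) = (x, c + 1) :: t := by
        show (match pvRleRec (x :: rs) with
          | (l, c) :: rs => if x = l then (x, c + 1) :: rs else (x, 1) :: (l, c) :: rs
          | [] => [(x, 1)]) = (x, c + 1) :: t
        rw [hct]; simp
      rw [hR, pv_shift]
      rw [← hct]
      exact ih x (i + 1) start left right (i + 1) j bend nbend
        (by rcases hr with h | ⟨h0, hlt⟩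
            · exact Or.inl h
            · exact Or.inr ⟨h0, by omega⟩) rfl hj hj0
    · -- change at index i: both emit the same interval
      have hne : x ≠ cur := hx
      have hR : pvRleRec (cur :: x :: rs) = (cur, 1) :: (x, c) :: t := by
        show (match pvRleRec (x :: rs) with
          | (l, c) :: rs => if cur = l then (cur, c + 1) :: rs else (cur, 1) :: (l, c) :: rs
          | [] => [(cur, 1)]) = (cur, 1) :: (x, c) :: t
        rw [hct]; simp [Ne.symm hne]
      rw [hR, PySem.List.slice_from_one, List.tail_cons, List.zip_cons_cons,
        PySem.List.enumerate_cons, List.foldl_cons]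
      set r' : Int := if m - i < bias then 0 else right with hr'
      have hrcl : r' = (if bias ≤ m - i then bias else 0) := by
        rcases hr with h | ⟨h0, hlt⟩
        · rw [hr', h]; by_cases hc : m - i < bias
          · rw [if_pos hc, if_neg (by omega)]
          · rw [if_neg hc, if_pos (by omega)]
        · rw [hr', h0, if_pos hlt, if_neg (by omega)]
      have hlo : start - (if j = 0 then (0 : Int) else bias) = start - left := by
        rcases hj with ⟨hj0', hl⟩ | ⟨hjne, hl⟩
        · rw [if_pos hj0', hl]
        · rw [if_neg hjne, hl]
      have hinv' : r' = bias ∨ (r' = 0 ∧ m - (i + 1) < bias) := by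
        rw [hr']
        by_cases hc : m - i < bias
        · exact Or.inr ⟨if_pos hc, by omega⟩
        · rcases hr with h | ⟨h0, hlt⟩
          · exact Or.inl (by rw [if_neg hc, h])
          · exact absurd hlt hc
      rw [pvStepR_eval]
      by_cases hgt : cur < x
      · rw [if_pos hgt]
        have hA0 : pvStepA bias m (cur, start, left, right, bend, nbend) (i, x)
            = (x, i, bias, r', bend, nbend ++ [(start - left, i + r')]) := by
          simp [pvStepA, hne, hgt, ← hr']
        rw [hA0, show i + (1 : Int) - 1 = i from by ring, hlo, ← hrcl]
        have ihx := ih x (i + 1) i bias r' (i + 1) (j + 1) bend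
          (nbend ++ [(start - left, i + r')]) hinv' rfl (Or.inr ⟨by omega, rfl⟩) (by omega)
        rw [hct, PySem.List.slice_from_one, List.tail_cons] at ihx
        exact ihx
      · rw [if_neg hgt]
        have hA0 : pvStepA bias m (cur, start, left, right, bend, nbend) (i, x)
            = (x, i, bias, r', bend ++ [(start - left, i + r')], nbend) := by
          have hng : ¬ x > cur := hgt
          simp [pvStepA, hne, hng, ← hr']
        rw [hA0, show i + (1 : Int) - 1 = i from by ring, hlo, ← hrcl]
        have ihx := ih x (i + 1) i bias r' (i + 1) (j + 1)
          (bend ++ [(start - left, i + r')]) nbend hinv' rfl (Or.inr ⟨by omega, rfl⟩) (by omega)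
        rw [hct, PySem.List.slice_from_one, List.tail_cons] at ihx
        exact ihx

-- ===== VERDICT (by name: the statement is the Claim_ definition above) =====
theorem get_bend_not_bend_index_lables_spec : Claim_equal_get_bend_not_bend_index_lables := by
  intro lables_data bias _ hpre
  unfold Spec_get_bend_not_bend_index_lables
  match lables_data with
  | [] => exact absurd rfl hpre
  | c :: rest =>
    show get_bend_not_bend_index_lables (c :: rest) bias
        = get_bend_not_bend_index_lables_alt (c :: rest) bias
    unfold get_bend_not_bend_index_lables get_bend_not_bend_index_lables_alt
    simp only [PySem.List.slice_from_one, List.tail_cons]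
    rw [pv_rle_glue, pvGlue_nil_left]
    have hm : ((c :: rest).length : Int) - 1 = (rest.length : Int) := by
      simp only [List.length_cons]; push_cast; ring
    rw [hm]
    have := pv_main bias (rest.length : Int) rest c 0 0 0 bias 0 0 [] []
      (Or.inl rfl) rfl (Or.inl ⟨rfl, rfl⟩) le_rfl
    rw [PySem.List.slice_from_one] at this
    exact this
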